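-- pv_equiv track=rewrite | github.com/vadyusikh/PTETA | PTETA/listener/utils/functions.py | dict_special_comparator
-- ===== SOURCE A (Python) =====
-- def dict_special_comparator(dict1, dict2, not_compare_keys=['response_datetime']):
--     if not isinstance(not_compare_keys, set):
--         not_compare_keys = set(not_compare_keys)
--     if not (dict1.keys() ^ dict2.keys()).issubset(not_compare_keys):
--         return False
--     for k in dict1.keys() & dict2.keys() - not_compare_keys:
--         if dict1[k] != dict2[k]:
--             return False
--     return True
-- ===== SOURCE B (Python) =====
-- def dict_special_comparator(dict1, dict2, not_compare_keys=['response_datetime']):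
--     ignore = set(not_compare_keys)
--     proj1 = {k: v for k, v in dict1.items() if k not in ignore}
--     proj2 = {k: v for k, v in dict2.items() if k not in ignore}
--     return proj1 == proj2
-- ===== Notes on version B (the rewrite author's own statement) =====
-- stated objective: simpler
-- what changed: Instead of A's staged check (symmetric-difference subset guard followed by a value loop over intersection-minus-ignored keys), B materialises the two dicts restricted to the non-ignored keys and returns whether these projections are equal as dicts.
import Mathlib
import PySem

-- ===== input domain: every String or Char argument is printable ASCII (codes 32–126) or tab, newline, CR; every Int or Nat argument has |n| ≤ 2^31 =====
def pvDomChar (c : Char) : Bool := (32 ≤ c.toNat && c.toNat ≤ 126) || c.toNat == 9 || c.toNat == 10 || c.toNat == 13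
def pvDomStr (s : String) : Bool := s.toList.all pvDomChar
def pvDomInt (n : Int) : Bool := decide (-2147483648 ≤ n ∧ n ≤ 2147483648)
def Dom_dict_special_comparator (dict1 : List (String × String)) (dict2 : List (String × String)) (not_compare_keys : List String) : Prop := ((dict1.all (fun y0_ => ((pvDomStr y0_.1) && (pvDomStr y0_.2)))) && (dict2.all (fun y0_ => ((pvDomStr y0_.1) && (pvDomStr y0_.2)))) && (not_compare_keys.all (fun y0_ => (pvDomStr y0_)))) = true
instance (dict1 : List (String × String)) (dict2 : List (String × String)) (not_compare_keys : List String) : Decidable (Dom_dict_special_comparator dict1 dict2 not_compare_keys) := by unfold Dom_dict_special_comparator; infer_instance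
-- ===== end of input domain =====

-- B replaces A's staged check (symmetric-difference subset guard, then a value loop over
-- intersection-minus-ignored keys) by building both dicts restricted to the non-ignored
-- keys and comparing these projections as dicts; same cost.

-- ===== PORT A =====
def dict_special_comparator (dict1 : List (String × String)) (dict2 : List (String × String)) (not_compare_keys : List String) : Bool :=
  let d1 := PySem.Dict.ofList dict1
  let d2 := PySem.Dict.ofList dict2
  let ncs : PySem.Set String := PySem.Set.ofList not_compare_keys
  if !(PySem.Set.issubset (PySem.Set.symmDiff d1.keys d2.keys) ncs) then false
  else (PySem.Set.inter d1.keys (PySem.Set.diff d2.keys ncs)).all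
        (fun k => d1.get? k == d2.get? k)

-- ===== PORT B =====
-- the dict comprehension {k: v for k, v in d.items() if k not in ignore}
def pvProj (d : PySem.Dict String String) (ign : PySem.Set String) : PySem.Dict String String :=
  (d.items.filter (fun p => !(PySem.Set.contains ign p.1))).foldl
    (fun acc p => acc.insert p.1 p.2) PySem.Dict.empty

-- Python's 'proj1 == proj2' on dicts: same keys as a set, and every key maps to the same value
def pvDictEq (a b : PySem.Dict String String) : Bool :=
  PySem.Set.equal a.keys b.keys && a.keys.all (fun k => a.get? k == b.get? k)

def dict_special_comparator_alt (dict1 : List (String × String)) (dict2 : List (String × String)) (not_compare_keys : List String) : Bool :=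
  let ignore : PySem.Set String := PySem.Set.ofList not_compare_keys
  let proj1 := pvProj (PySem.Dict.ofList dict1) ignore
  let proj2 := pvProj (PySem.Dict.ofList dict2) ignore
  pvDictEq proj1 proj2

-- ===== PRECONDITION & SPEC =====
def Spec_dict_special_comparator (dict1 : List (String × String)) (dict2 : List (String × String)) (not_compare_keys : List String) (out : Bool) : Prop := out = dict_special_comparator_alt dict1 dict2 not_compare_keys
instance (dict1 : List (String × String)) (dict2 : List (String × String)) (not_compare_keys : List String) (out : Bool) : Decidable (Spec_dict_special_comparator dict1 dict2 not_compare_keys out) := by unfold Spec_dict_special_comparator; infer_instance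

-- ===== CLAIM (what is proved, stated in full; the proofs are below) =====
def Claim_equal_dict_special_comparator : Prop := ∀ (dict1 : List (String × String)) (dict2 : List (String × String)) (not_compare_keys : List String), Dom_dict_special_comparator dict1 dict2 not_compare_keys → Spec_dict_special_comparator dict1 dict2 not_compare_keys (dict_special_comparator dict1 dict2 not_compare_keys)

-- ===== LEMMAS AND PROOFS =====

-- membership in a dict's key list is exactly a successful lookup
theorem pv_mem_keys_iff_isSome (d : PySem.Dict String String) (k : String) :
    k ∈ d.keys ↔ (d.get? k).isSome := by
  rw [← not_iff_not]
  simp [← PySem.Dict.get?_eq_none_iff_not_mem_keys, Option.isSome_iff_ne_none]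

-- lookup in a literal dict whose pairs were filtered by the key predicate 'not in ign'
theorem pv_get?_mk_filter (l : List (String × String)) (hn : (l.map Prod.fst).Nodup)
    (ign : PySem.Set String) (k : String) :
    (PySem.Dict.mk (l.filter (fun p => !(PySem.Set.contains ign p.1)))).get? k
      = if k ∈ ign then none else (PySem.Dict.mk l).get? k := by
  induction l with
  | nil => simp [PySem.Dict.get?]
  | cons a l ih =>
      obtain ⟨ka, va⟩ := a
      simp only [List.map_cons, List.nodup_cons] at hn
      by_cases ha : ka ∈ ign
      · rw [List.filter_cons_of_neg (by simp [ha]), ih hn.2]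
        by_cases hk : k ∈ ign
        · simp [hk]
        · have hne : ka ≠ k := fun h => hk (h ▸ ha)
          simp [hk, PySem.Dict.get?_mk_cons, hne]
      · rw [List.filter_cons_of_pos (by simp [ha])]
        by_cases hak : ka = k
        · subst hak
          simp [PySem.Dict.get?_mk_cons, ha]
        · simp only [PySem.Dict.get?_mk_cons, beq_iff_eq, if_neg hak]
          exact ih hn.2

-- the projection looks up like the original dict outside the ignore set, and is empty on it
theorem pvProj_get? (d : PySem.Dict String String) (hd : d.keys.Nodup)
    (ign : PySem.Set String) (k : String) :
    (pvProj d ign).get? k = if k ∈ ign then none else d.get? k := by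
  have hsl : (d.items.filter (fun p => !(PySem.Set.contains ign p.1))).Sublist d.items :=
    List.filter_sublist
  have hfn : ((d.items.filter (fun p => !(PySem.Set.contains ign p.1))).map Prod.fst).Nodup :=
    List.Nodup.sublist (List.Sublist.map Prod.fst hsl) hd
  have hitems : (pvProj d ign).items
      = d.items.filter (fun p => !(PySem.Set.contains ign p.1)) := by
    unfold pvProj
    rw [PySem.Dict.items_foldl_insert_fresh
      (d.items.filter (fun p => !(PySem.Set.contains ign p.1))) Prod.fst Prod.snd
      PySem.Dict.empty (fun a _ => PySem.Dict.contains_empty a.1) hfn]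
    simp [PySem.Dict.empty]
  have : pvProj d ign = PySem.Dict.mk (d.items.filter (fun p => !(PySem.Set.contains ign p.1))) :=
    PySem.Dict.ext hitems
  rw [this, pv_get?_mk_filter d.items hd ign k]

-- pvDictEq is extensional equality of lookups
theorem pvDictEq_iff (a b : PySem.Dict String String) :
    pvDictEq a b = true ↔ ∀ k, a.get? k = b.get? k := by
  unfold pvDictEq
  rw [Bool.and_eq_true, PySem.Set.equal_iff, List.all_eq_true]
  constructor
  · rintro ⟨hkeys, hvals⟩ k
    by_cases hk : k ∈ a.keys
    · simpa [beq_iff_eq] using hvals k hk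
    · have hk' : k ∉ b.keys := fun h => hk ((hkeys k).mpr h)
      rw [← PySem.Dict.get?_eq_none_iff_not_mem_keys] at hk hk'
      rw [hk, hk']
  · intro h
    refine ⟨fun k => ?_, fun k _ => by simp [h k]⟩
    rw [pv_mem_keys_iff_isSome, pv_mem_keys_iff_isSome, h k]

-- A's result, characterised extensionally (the dicts' key lists are Nodup)
theorem pvA_iff (d1 d2 : PySem.Dict String String) (ncs : PySem.Set String) :
    (if !(PySem.Set.issubset (PySem.Set.symmDiff d1.keys d2.keys) ncs) then false
     else (PySem.Set.inter d1.keys (PySem.Set.diff d2.keys ncs)).all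
            (fun k => d1.get? k == d2.get? k)) = true ↔
    ∀ k, k ∉ ncs → d1.get? k = d2.get? k := by
  cases hsub : PySem.Set.issubset (PySem.Set.symmDiff d1.keys d2.keys) ncs
  · -- guard fails: some key lies in exactly one dict and is not ignored
    simp only [Bool.not_false, if_true, Bool.false_eq_true, false_iff]
    have hex : ∃ k, k ∈ PySem.Set.symmDiff d1.keys d2.keys ∧ k ∉ ncs := by
      by_contra hall
      rw [not_exists] at hall
      simp only [not_and_or, not_not] at hall
      rw [← Bool.not_eq_true, PySem.Set.issubset_iff] at hsub
      exact hsub fun x hx => by have := hall x; tauto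
    intro hall
    obtain ⟨k, hks, hkn⟩ := hex
    have heq := hall k hkn
    rw [PySem.Set.mem_symmDiff] at hks
    rw [pv_mem_keys_iff_isSome d1 k, pv_mem_keys_iff_isSome d2 k] at hks
    rcases hks with ⟨h1, h2⟩ | ⟨h1, h2⟩ <;>
      simp_all [Option.isSome_iff_ne_none]
  · simp only [Bool.not_true, Bool.false_eq_true, if_false, List.all_eq_true]
    have hsub' : ∀ x ∈ PySem.Set.symmDiff d1.keys d2.keys, x ∈ ncs := by
      rw [PySem.Set.issubset_iff] at hsub; exact hsub
    constructor
    · intro h k hk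
      by_cases h1 : k ∈ d1.keys <;> by_cases h2 : k ∈ d2.keys
      · have := h k (by rw [PySem.Set.mem_inter, PySem.Set.mem_diff]; exact ⟨h1, h2, hk⟩)
        simpa [beq_iff_eq] using this
      · exact absurd (hsub' k (by rw [PySem.Set.mem_symmDiff]; tauto)) hk
      · exact absurd (hsub' k (by rw [PySem.Set.mem_symmDiff]; tauto)) hk
      · rw [← PySem.Dict.get?_eq_none_iff_not_mem_keys] at h1 h2
        rw [h1, h2]
    · intro h k hk
      rw [PySem.Set.mem_inter, PySem.Set.mem_diff] at hk
      simp [h k hk.2.2]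

-- ===== VERDICT (by name: the statement is the Claim_ definition above) =====
theorem dict_special_comparator_spec : Claim_equal_dict_special_comparator := by
  intro dict1 dict2 ncmp _
  unfold Spec_dict_special_comparator dict_special_comparator dict_special_comparator_alt
  simp only []
  rw [Bool.eq_iff_iff, pvA_iff, pvDictEq_iff]
  constructor
  · intro h k
    rw [pvProj_get? _ (PySem.Dict.nodup_keys_ofList _), pvProj_get? _ (PySem.Dict.nodup_keys_ofList _)]
    by_cases hk : k ∈ PySem.Set.ofList ncmp <;> simp [hk, h]
  · intro h k hk
    have := h k
    rw [pvProj_get? _ (PySem.Dict.nodup_keys_ofList _),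
        pvProj_get? _ (PySem.Dict.nodup_keys_ofList _), if_neg hk, if_neg hk] at this
    exact this
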